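-- pv_equiv track=rewrite | github.com/anthnd/ece103_rsa | rsa.py | asciiToString
-- ===== SOURCE A (Python) =====
-- import math, pyperclip, textwrap, random, sys
--
-- def asciiToString(asciiStr):
--     length = len(str(asciiStr))
--     s = ""
--     if (length % 3 == 2):
--         s = "0" + str(asciiStr)
--     elif (length % 3 == 1):
--         s = "00" + str(asciiStr)
--     else:
--         s = str(asciiStr)
--
--     codeList = textwrap.wrap(s, 3)
--     msg = ""
--     for code in codeList:
--         msg += toCharCode(code)
--     return msg
--
-- def toCharCode(string):
--     cleanInt = int(string.lstrip("0"))
--     return chr(cleanInt)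
-- ===== SOURCE B (Python) =====
-- def asciiToString(asciiStr):
--     chars = []
--     n = asciiStr
--     while n > 0:
--         n, d = divmod(n, 1000)
--         chars.append(chr(d))
--     return "".join(reversed(chars))
-- ===== Notes on version B (the rewrite author's own statement) =====
-- stated objective: simpler
-- what changed: Replaces decimal-string padding + textwrap.wrap + per-chunk lstrip/int/chr with pure arithmetic: repeated divmod by 1000 extracts each character code directly (the 3-digit decimal chunks are exactly the base-1000 digits), building the characters back-to-front.
-- crash fix: On asciiStr <= 0 and on positive inputs with an all-zero 3-digit group A raises ValueError (chr of a negative number, or int('') after lstrip); B returns '' for non-positive input and chr(0) for zero groups. — e.g. on asciiToString(72000): A raises ValueError, B returns "H\x00"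
import Mathlib
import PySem

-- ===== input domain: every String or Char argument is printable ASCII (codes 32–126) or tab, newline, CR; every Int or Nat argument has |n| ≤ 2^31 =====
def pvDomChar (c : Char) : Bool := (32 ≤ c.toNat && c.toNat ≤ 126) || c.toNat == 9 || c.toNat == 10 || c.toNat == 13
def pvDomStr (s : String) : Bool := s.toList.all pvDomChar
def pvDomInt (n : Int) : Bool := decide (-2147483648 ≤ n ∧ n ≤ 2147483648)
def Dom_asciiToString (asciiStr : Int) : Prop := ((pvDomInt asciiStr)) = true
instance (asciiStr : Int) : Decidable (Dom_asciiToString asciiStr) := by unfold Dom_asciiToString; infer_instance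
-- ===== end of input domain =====

-- B replaces A's decimal-string padding + textwrap.wrap + per-chunk lstrip/int/chr with plain
-- arithmetic (repeated divmod by 1000, characters built back-to-front): simpler, no string handling.


-- ===== PORT A =====
-- string.lstrip("0"): hand port, exact — drops exactly the leading '0' characters
def lstripZeros : List Char → List Char
  | [] => []
  | c :: rest => if c = '0' then lstripZeros rest else c :: rest

-- toCharCode: int(string.lstrip("0")) then chr(cleanInt); none exactly where Python raises
-- (int('') ValueError, chr out of range ValueError). Char.ofNat is exact here: every code that
-- reaches chr without raising is < 1000.
def toCharCode (code : List Char) : Option (List Char) :=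
  match PySem.Int.ofChars? (lstripZeros code) with
  | none => none
  | some c => if 0 ≤ c ∧ c < 1114112 then some [Char.ofNat c.toNat] else none

-- the if/elif/else zero-padding block of A (length is a Python len, hence nonnegative: Nat % is exact)
def pad (l : List Char) : List Char :=
  if l.length % 3 == 2 then '0' :: l
  else if l.length % 3 == 1 then '0' :: '0' :: l
  else l

-- textwrap.wrap(s, 3): hand port, exact for the digit-only text that reaches it whenever A returns
def wrap3 : List Char → List (List Char)
  | a :: b :: c :: rest => [a, b, c] :: wrap3 rest
  | [] => []
  | l => [l]

-- the 'for code in codeList: msg += toCharCode(code)' loop; none as soon as any chunk raises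
def msgLoop (codeList : List (List Char)) : Option (List Char) :=
  codeList.foldl (fun acc code =>
    match acc, toCharCode code with
    | some m, some c => some (m ++ c)
    | _, _ => none) (some [])

def asciiToString (asciiStr : Int) : String :=
  String.ofList ((msgLoop (wrap3 (pad (PySem.Int.toChars asciiStr)))).getD [])

-- ===== PORT B =====
-- the 'while n > 0: n, d = divmod(n, 1000); chars.append(chr(d))' loop; the fuel argument only
-- makes the recursion structural (n.toNat + 1 steps always suffice since n shrinks every turn)
def altLoop : Nat → Int → List (List Char) → List (List Char)
  | 0, _, chars => chars
  | fuel + 1, n, chars =>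
    if 0 < n then
      altLoop fuel (PySem.Int.floordiv n 1000)
        (chars ++ [[Char.ofNat (PySem.Int.mod n 1000).toNat]])
    else chars

-- return "".join(reversed(chars))
def asciiToString_alt (asciiStr : Int) : String :=
  String.ofList ((altLoop (asciiStr.toNat + 1) asciiStr []).reverse.flatten)

-- ===== PRECONDITION & SPEC =====
-- A raises ValueError exactly on asciiStr ≤ 0 and on positive inputs one of whose 3-digit decimal
-- groups (= base-1000 digits) is zero: int('') after lstrip('0') on a "000" group, or chr of a
-- negative number. Pre_ admits exactly the inputs on which A returns.
def Pre_asciiToString (asciiStr : Int) : Prop :=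
  0 < asciiStr ∧ ∀ d ∈ Nat.digits 1000 asciiStr.toNat, 0 < d
instance (asciiStr : Int) : Decidable (Pre_asciiToString asciiStr) := by
  unfold Pre_asciiToString; infer_instance

def pvWitness_asciiToString : Int := 72101

-- On asciiStr ≤ 0 and on positive inputs with an all-zero 3-digit group A raises ValueError;
-- B returns '' for non-positive input and chr(0) for zero groups.
def Raises_asciiToString (asciiStr : Int) : Prop :=
  asciiStr ≤ 0 ∨ ∃ d ∈ Nat.digits 1000 asciiStr.toNat, d = 0
instance (asciiStr : Int) : Decidable (Raises_asciiToString asciiStr) := by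
  unfold Raises_asciiToString; infer_instance

def pvRaiseWitness_asciiToString : Int := 72000
def pvRaiseWitnessOut_asciiToString : String := "H\x00"

def Spec_asciiToString (asciiStr : Int) (out : String) : Prop := out = asciiToString_alt asciiStr
instance (asciiStr : Int) (out : String) : Decidable (Spec_asciiToString asciiStr out) := by
  unfold Spec_asciiToString; infer_instance

-- ===== CLAIM (what is proved, stated in full; the proofs are below) =====
def Claim_equal_asciiToString : Prop :=
  ∀ (asciiStr : Int), Dom_asciiToString asciiStr → Pre_asciiToString asciiStr →
    Spec_asciiToString asciiStr (asciiToString asciiStr)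

def Claim_raises_asciiToString : Prop :=
  (∀ (asciiStr : Int), Dom_asciiToString asciiStr → Raises_asciiToString asciiStr →
      ¬ Pre_asciiToString asciiStr) ∧
  (Dom_asciiToString (pvRaiseWitness_asciiToString) ∧
    Raises_asciiToString (pvRaiseWitness_asciiToString) ∧
    asciiToString_alt (pvRaiseWitness_asciiToString) = pvRaiseWitnessOut_asciiToString)

-- ===== LEMMAS AND PROOFS =====

-- Nat.toDigits 10 unfolds one decimal digit at a time from the right
lemma toDigitsCore_shift : ∀ (n f : Nat) (l : List Char), n < f →
    Nat.toDigitsCore 10 f n l = Nat.toDigits 10 n ++ l := by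
  intro n
  induction n using Nat.strong_induction_on with
  | _ n ih =>
    intro f l h
    match f, h with
    | f + 1, h =>
      rw [Nat.toDigitsCore]
      by_cases h10 : n / 10 = 0
      · simp only [h10, if_true]
        have : Nat.toDigits 10 n = [Nat.digitChar (n % 10)] := by
          rw [Nat.toDigits, Nat.toDigitsCore]; simp [h10]
        rw [this]; rfl
      · simp only [h10, if_false]
        rw [ih (n / 10) (by omega) f _ (by omega)]
        have : Nat.toDigits 10 n = Nat.toDigits 10 (n / 10) ++ [Nat.digitChar (n % 10)] := by
          rw [Nat.toDigits, Nat.toDigitsCore]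
          simp only [h10, if_false]
          rw [ih (n / 10) (by omega) n _ (by omega)]
        rw [this]
        simp

lemma toDigits_step (n : Nat) :
    Nat.toDigits 10 n =
      if n < 10 then [Nat.digitChar n]
      else Nat.toDigits 10 (n / 10) ++ [Nat.digitChar (n % 10)] := by
  rw [Nat.toDigits, Nat.toDigitsCore]
  by_cases h10 : n / 10 = 0
  · have h : n < 10 := by omega
    simp [h10, h, Nat.mod_eq_of_lt h]
  · have h : ¬ n < 10 := by omega
    simp only [h10, if_false, h]
    rw [toDigitsCore_shift (n / 10) n _ (by omega)]

-- splitting off the last base-1000 digit of the decimal representation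
lemma toDigits_split1000 (n : Nat) (h : 1000 ≤ n) :
    Nat.toDigits 10 n = Nat.toDigits 10 (n / 1000) ++
      [Nat.digitChar (n % 1000 / 100), Nat.digitChar (n % 1000 / 10 % 10),
        Nat.digitChar (n % 1000 % 10)] := by
  rw [toDigits_step n, if_neg (by omega),
      toDigits_step (n / 10), if_neg (by omega),
      toDigits_step (n / 10 / 10), if_neg (by omega)]
  have e1 : n / 10 / 10 / 10 = n / 1000 := by omega
  have e2 : n / 10 / 10 % 10 = n % 1000 / 100 := by omega
  have e3 : n / 10 % 10 = n % 1000 / 10 % 10 := by omega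
  have e4 : n % 10 = n % 1000 % 10 := by omega
  rw [e1, e2, e3, e4]
  simp

lemma pad_append3 (xs ys : List Char) (h : ys.length = 3) :
    pad (xs ++ ys) = pad xs ++ ys := by
  have hl : (xs ++ ys).length % 3 = xs.length % 3 := by
    simp [List.length_append, h]
  unfold pad
  rw [hl]
  split <;> [skip; split] <;> simp

lemma pad_length_dvd (l : List Char) : 3 ∣ (pad l).length := by
  unfold pad
  split <;> [skip; split] <;> simp_all <;> omega

lemma wrap3_append : ∀ (xs ys : List Char), 3 ∣ xs.length →
    wrap3 (xs ++ ys) = wrap3 xs ++ wrap3 ys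
  | [], ys, _ => by simp [wrap3]
  | [a], ys, h => by simp at h
  | [a, b], ys, h => by simp at h
  | a :: b :: c :: rest, ys, h => by
    simp only [List.cons_append, wrap3]
    rw [wrap3_append rest ys (by simp at h; exact h)]

lemma msgLoop_append (gs : List (List Char)) (g : List Char) (w c : List Char)
    (hg : msgLoop gs = some w) (hc : toCharCode g = some c) :
    msgLoop (gs ++ [g]) = some (w ++ c) := by
  unfold msgLoop at *
  rw [List.foldl_append, hg]
  simp [hc]

-- B's loop: the accumulator is a prefix of the result
lemma altLoop_acc : ∀ (f : Nat) (n : Int) (chars : List (List Char)),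
    altLoop f n chars = chars ++ altLoop f n [] := by
  intro f
  induction f with
  | zero => intro n chars; simp [altLoop]
  | succ f ih =>
    intro n chars
    rw [altLoop, altLoop]
    by_cases h : 0 < n
    · rw [if_pos h, if_pos h, ih _ (chars ++ _), ih _ ([] ++ _)]
      simp
    · rw [if_neg h, if_neg h]; simp

-- B's loop: any sufficient fuel gives the same result
lemma altLoop_fuel : ∀ (m : Nat) (f₁ f₂ : Nat) (n : Int), n.toNat = m → m < f₁ → m < f₂ →
    altLoop f₁ n [] = altLoop f₂ n [] := by
  intro m
  induction m using Nat.strong_induction_on with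
  | _ m ih =>
    intro f₁ f₂ n hm h1 h2
    match f₁, f₂, h1, h2 with
    | f₁ + 1, f₂ + 1, h1, h2 =>
      rw [altLoop, altLoop]
      by_cases h : 0 < n
      · rw [if_pos h, if_pos h]
        rw [altLoop_acc f₁, altLoop_acc f₂]
        have hq : (PySem.Int.floordiv n 1000).toNat = m / 1000 := by
          rw [PySem.Int.floordiv_eq_ediv_of_pos (by norm_num)]
          omega
        have hlt : m / 1000 < m := by omega
        rw [ih (m / 1000) hlt f₁ f₂ _ hq (by omega) (by omega)]
      · rw [if_neg h, if_neg h]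

-- the flat character list B produces
def bOut (m : Nat) : List Char := (altLoop (m + 1) (m : Int) []).reverse.flatten

lemma bOut_step (m : Nat) (h : 1 ≤ m) :
    bOut m = bOut (m / 1000) ++ [Char.ofNat (m % 1000)] := by
  unfold bOut
  rw [altLoop, if_pos (by exact_mod_cast h)]
  rw [altLoop_acc]
  have hq : PySem.Int.floordiv (m : Int) 1000 = ((m / 1000 : Nat) : Int) := by
    simp
  have hr : (PySem.Int.mod (m : Int) 1000).toNat = m % 1000 := by
    rw [PySem.Int.mod_eq_emod_of_pos (by norm_num)]; omega
  rw [hq, hr]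
  rw [altLoop_fuel (m / 1000) m (m / 1000 + 1) _ (by omega) (by omega) (by omega)]
  simp

-- base case, fully finite: one chunk, m < 1000
set_option maxRecDepth 40000 in
set_option maxHeartbeats 2000000 in
lemma base_case : ∀ m : Nat, m < 1000 → 1 ≤ m →
    msgLoop (wrap3 (pad (Nat.toDigits 10 m))) = some [Char.ofNat m] := by decide

-- step-case chunk, fully finite
set_option maxRecDepth 40000 in
set_option maxHeartbeats 2000000 in
lemma chunk_code : ∀ r : Nat, r < 1000 → 1 ≤ r →
    toCharCode [Nat.digitChar (r / 100), Nat.digitChar (r / 10 % 10), Nat.digitChar (r % 10)] =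
      some [Char.ofNat r] := by decide

lemma bOut_small (m : Nat) (h1 : 1 ≤ m) (h : m < 1000) : bOut m = [Char.ofNat m] := by
  rw [bOut_step m h1]
  have hq : m / 1000 = 0 := by omega
  rw [hq]
  have h0 : bOut 0 = [] := by simp [bOut, altLoop]
  rw [h0, Nat.mod_eq_of_lt h]
  simp

lemma main_lemma : ∀ m : Nat, 1 ≤ m → (∀ d ∈ Nat.digits 1000 m, 0 < d) →
    msgLoop (wrap3 (pad (Nat.toDigits 10 m))) = some (bOut m) := by
  intro m
  induction m using Nat.strong_induction_on with
  | _ m ih =>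
    intro h1 hd
    by_cases hm : m < 1000
    · rw [base_case m hm h1, bOut_small m h1 hm]
    · have hdig : Nat.digits 1000 m = m % 1000 :: Nat.digits 1000 (m / 1000) :=
        Nat.digits_def' (by norm_num) (by omega)
      have hr : 0 < m % 1000 := by
        apply hd; rw [hdig]; exact List.mem_cons_self
      have hq1 : 1 ≤ m / 1000 := by omega
      have hdq : ∀ d ∈ Nat.digits 1000 (m / 1000), 0 < d := by
        intro d hdm; apply hd; rw [hdig]; exact List.mem_cons_of_mem _ hdm
      rw [toDigits_split1000 m (by omega)]
      rw [pad_append3 _ _ (by simp)]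
      rw [wrap3_append _ _ (pad_length_dvd _)]
      have hw : wrap3 [Nat.digitChar (m % 1000 / 100), Nat.digitChar (m % 1000 / 10 % 10),
          Nat.digitChar (m % 1000 % 10)] = [[Nat.digitChar (m % 1000 / 100),
          Nat.digitChar (m % 1000 / 10 % 10), Nat.digitChar (m % 1000 % 10)]] := rfl
      rw [hw]
      have hih := ih (m / 1000) (by omega) hq1 hdq
      have hcc := chunk_code (m % 1000) (by omega) hr
      rw [msgLoop_append _ _ _ _ hih hcc]
      rw [bOut_step m h1]

-- ===== VERDICT (by name: the statement is the Claim_ definition above) =====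
theorem asciiToString_spec : Claim_equal_asciiToString := by
  intro n _ hpre
  obtain ⟨hpos, hdig⟩ := hpre
  have hm : n = ((n.toNat : Nat) : Int) := by omega
  set m := n.toNat with hmdef
  have h1 : 1 ≤ m := by omega
  have htc : PySem.Int.toChars n = Nat.toDigits 10 m := by
    rw [PySem.Int.toChars, if_neg (by omega)]
  unfold Spec_asciiToString asciiToString asciiToString_alt
  rw [htc, main_lemma m h1 hdig]
  rw [show (altLoop (n.toNat + 1) n []) = altLoop (m + 1) ((m : Nat) : Int) [] by rw [← hm]]
  rfl

@[simp] theorem asciiToString_raises : Claim_raises_asciiToString := by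
  unfold Claim_raises_asciiToString
  refine ⟨?_, by decide⟩
  rintro n _ (hle | ⟨d, hd, hd0⟩) ⟨hpos, hall⟩
  · omega
  · have := hall d hd
    omega
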